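-- pv_equiv track=rewrite | github.com/zhouliupku/LGtagging_LSTM | lg_utils.py | get_sent_len_for_pages
-- ===== SOURCE A (Python) =====
-- def get_sent_len_for_pages(tag_seq_list, eos_tag):
--     """
--     tag_seq_list: list of list of tags
--     """
--     parsed_sent_len_for_pages = []
--     for tag_seq in tag_seq_list:
--         # make list of int (i.e. sentence lengths) out of list of tags
--         parsed_sent_len = []
--         current_len = 0
--         for tag in tag_seq[1:-1]: # ignore <S> and </S>
--             current_len += 1
--             if tag == eos_tag:
--                 parsed_sent_len.append(current_len)
--                 current_len = 0
--         # in case last char is not tagged as 'S'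
--         if current_len > 0:
--             parsed_sent_len.append(current_len)
--         parsed_sent_len_for_pages.append(parsed_sent_len)
--     return parsed_sent_len_for_pages
-- ===== SOURCE B (Python) =====
-- def get_sent_len_for_pages(tag_seq_list, eos_tag):
--     """
--     tag_seq_list: list of list of tags
--     """
--     pages = []
--     for tag_seq in tag_seq_list:
--         inner = tag_seq[1:-1]  # ignore <S> and </S>
--         # boundary positions: indices of end-of-sentence tags
--         idxs = [i for i, t in enumerate(inner) if t == eos_tag]
--         lens = []
--         prev = -1
--         for i in idxs:
--             lens.append(i - prev)
--             prev = i
--         tail = len(inner) - 1 - prev  # untagged trailing remainder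
--         if tail > 0:
--             lens.append(tail)
--         pages.append(lens)
--     return pages
-- ===== Notes on version B (the rewrite author's own statement) =====
-- stated objective: alternative
-- what changed: B computes each page's sentence lengths from the list of eos-tag boundary indices (differences of consecutive boundaries plus a trailing remainder) instead of incrementing a running counter per tag.
import Mathlib
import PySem

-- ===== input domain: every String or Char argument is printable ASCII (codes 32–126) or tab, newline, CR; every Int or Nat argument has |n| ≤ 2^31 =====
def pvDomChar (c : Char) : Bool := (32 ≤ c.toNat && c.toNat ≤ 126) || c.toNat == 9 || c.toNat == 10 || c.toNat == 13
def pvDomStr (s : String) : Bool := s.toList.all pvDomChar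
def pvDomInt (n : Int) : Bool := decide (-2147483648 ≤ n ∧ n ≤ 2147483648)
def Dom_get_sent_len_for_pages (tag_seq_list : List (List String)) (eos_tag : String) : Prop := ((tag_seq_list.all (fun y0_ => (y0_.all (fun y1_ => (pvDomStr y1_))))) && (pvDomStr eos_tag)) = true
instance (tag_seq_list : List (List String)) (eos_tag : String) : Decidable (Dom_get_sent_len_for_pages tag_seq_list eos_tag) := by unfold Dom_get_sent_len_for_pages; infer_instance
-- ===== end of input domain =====

-- B computes each page's sentence lengths from the eos-tag boundary indices (differences of
-- consecutive boundaries plus a trailing remainder) instead of a running counter (alternative).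

-- ===== PORT A =====
def get_sent_len_for_pages (tag_seq_list : List (List String)) (eos_tag : String) : List (List Int) :=
  tag_seq_list.foldl (fun parsed_sent_len_for_pages tag_seq =>
    let st := (PySem.List.slice tag_seq (some 1) (some (-1))).foldl
      (fun (s : List Int × Int) tag =>
        let current_len := s.2 + 1
        if tag == eos_tag then (s.1 ++ [current_len], 0) else (s.1, current_len))
      ([], 0)
    let parsed_sent_len := if st.2 > 0 then st.1 ++ [st.2] else st.1
    parsed_sent_len_for_pages ++ [parsed_sent_len]) []

-- ===== PORT B =====
def get_sent_len_for_pages_alt (tag_seq_list : List (List String)) (eos_tag : String) : List (List Int) :=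
  tag_seq_list.foldl (fun pages tag_seq =>
    let inner := PySem.List.slice tag_seq (some 1) (some (-1))
    let idxs := ((PySem.List.enumerate inner).filter (fun p => p.2 == eos_tag)).map (fun p => p.1)
    let st := idxs.foldl (fun (s : List Int × Int) i => (s.1 ++ [i - s.2], i)) ([], -1)
    let tail := (inner.length : Int) - 1 - st.2
    let lens := if tail > 0 then st.1 ++ [tail] else st.1
    pages ++ [lens]) []

-- ===== PRECONDITION & SPEC =====
def Spec_get_sent_len_for_pages (tag_seq_list : List (List String)) (eos_tag : String) (out : List (List Int)) : Prop := out = get_sent_len_for_pages_alt tag_seq_list eos_tag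
instance (tag_seq_list : List (List String)) (eos_tag : String) (out : List (List Int)) : Decidable (Spec_get_sent_len_for_pages tag_seq_list eos_tag out) := by unfold Spec_get_sent_len_for_pages; infer_instance

-- ===== CLAIM (what is proved, stated in full; the proofs are below) =====
def Claim_equal_get_sent_len_for_pages : Prop := ∀ (tag_seq_list : List (List String)) (eos_tag : String), Dom_get_sent_len_for_pages tag_seq_list eos_tag → Spec_get_sent_len_for_pages tag_seq_list eos_tag (get_sent_len_for_pages tag_seq_list eos_tag)

-- ===== LEMMAS AND PROOFS =====

-- common characterisation of one page's sentence lengths: c = tags seen since the last boundary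
def pvSeg (eos_tag : String) : List String → Int → List Int
  | [], c => if c > 0 then [c] else []
  | t :: ts, c => if t == eos_tag then (c + 1) :: pvSeg eos_tag ts 0 else pvSeg eos_tag ts (c + 1)

theorem pageA_eq_seg (eos_tag : String) (l : List String) (acc : List Int) (c : Int) :
    (let st := l.foldl (fun (s : List Int × Int) tag =>
        let current_len := s.2 + 1
        if tag == eos_tag then (s.1 ++ [current_len], 0) else (s.1, current_len)) (acc, c)
     if st.2 > 0 then st.1 ++ [st.2] else st.1) = acc ++ pvSeg eos_tag l c := by
  induction l generalizing acc c with
  | nil => simp only [List.foldl_nil, pvSeg]; split <;> simp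
  | cons t ts ih =>
    simp only [List.foldl_cons, pvSeg]
    by_cases h : t == eos_tag
    · simp only [h, ite_true]
      have h1 := ih (acc ++ [c + 1]) 0
      simp only at h1
      rw [h1]
      simp
    · simp only [h, Bool.false_eq_true, ite_false]
      have h1 := ih acc (c + 1)
      simp only at h1
      rw [h1]

theorem pageB_eq_seg (eos_tag : String) (l : List String) (lens : List Int) (prev o : Int)
    (hpo : prev + 1 ≤ o) :
    (let idxs := ((PySem.List.enumerate l o).filter (fun p => p.2 == eos_tag)).map (fun p => p.1)
     let st := idxs.foldl (fun (s : List Int × Int) i => (s.1 ++ [i - s.2], i)) (lens, prev)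
     let tail := o + (l.length : Int) - 1 - st.2
     if tail > 0 then st.1 ++ [tail] else st.1) = lens ++ pvSeg eos_tag l (o - prev - 1) := by
  induction l generalizing lens prev o with
  | nil =>
    simp only [PySem.List.enumerate_nil, List.filter_nil, List.map_nil, List.foldl_nil,
      List.length_nil, pvSeg]
    have heq : o + ((0:Nat):Int) - 1 - prev = o - prev - 1 := by push_cast; ring
    rw [heq]
    split <;> simp
  | cons t ts ih =>
    rw [PySem.List.enumerate_cons]
    by_cases h : t == eos_tag
    · simp only [List.filter_cons, h, List.map_cons, List.foldl_cons, pvSeg, ite_true]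
      have := ih (lens ++ [o - prev]) o (o + 1) (by omega)
      simp only at this
      rw [show o + 1 - o - 1 = (0:Int) by ring] at this
      rw [show o + ((t :: ts).length : Int) - 1 = (o + 1) + (ts.length : Int) - 1 by simp; ring]
      rw [this]
      rw [show o - prev = (o - prev - 1) + 1 by ring]
      simp
    · simp only [List.filter_cons, h, pvSeg]
      have := ih lens prev (o + 1) (by omega)
      simp only at this
      rw [show o + 1 - prev - 1 = (o - prev - 1) + 1 by ring] at this
      rw [show o + ((t :: ts).length : Int) - 1 = (o + 1) + (ts.length : Int) - 1 by simp; ring]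
      simp only [Bool.false_eq_true, ite_false] at *
      rw [this]

theorem page_eq (eos_tag : String) (l : List String) :
    (let st := l.foldl (fun (s : List Int × Int) tag =>
        let current_len := s.2 + 1
        if tag == eos_tag then (s.1 ++ [current_len], 0) else (s.1, current_len)) ([], 0)
     if st.2 > 0 then st.1 ++ [st.2] else st.1)
    = (let idxs := ((PySem.List.enumerate l 0).filter (fun p => p.2 == eos_tag)).map (fun p => p.1)
       let st := idxs.foldl (fun (s : List Int × Int) i => (s.1 ++ [i - s.2], i)) ([], -1)
       let tail := (l.length : Int) - 1 - st.2
       if tail > 0 then st.1 ++ [tail] else st.1) := by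
  have hA := pageA_eq_seg eos_tag l [] 0
  have hB := pageB_eq_seg eos_tag l [] (-1) 0 (by omega)
  simp only at hA hB
  rw [show (0:Int) - (-1) - 1 = 0 by ring] at hB
  rw [show (0:Int) + (l.length : Int) - 1 = (l.length : Int) - 1 by ring] at hB
  rw [hA, hB]

-- ===== VERDICT (by name: the statement is the Claim_ definition above) =====
theorem get_sent_len_for_pages_spec : Claim_equal_get_sent_len_for_pages := by
  intro tag_seq_list eos_tag _
  unfold Spec_get_sent_len_for_pages get_sent_len_for_pages get_sent_len_for_pages_alt
  congr 1
  funext pages tag_seq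
  simpa using congrArg (fun x => pages ++ [x]) (page_eq eos_tag (PySem.List.slice tag_seq (some 1) (some (-1))))
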